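-- pv_equiv track=rewrite | github.com/nusok95/Algoritmo-de-cifrado | cifrado.py | desintecalar
-- ===== SOURCE A (Python) =====
-- def desintecalar(palabra):
--     first_string = ''
--     second_string = ''
--     flag = 1
--     for letra in palabra:
--         if flag == 1:
--             first_string += letra
--             flag = 0
--         else:
--             second_string += letra
--             flag = 1
--     return(first_string[::-1] + second_string[::-1])
-- ===== SOURCE B (Python) =====
-- def desintecalar(palabra):
--     return palabra[::2][::-1] + palabra[1::2][::-1]
-- ===== Notes on version B (the rewrite author's own statement) =====
-- stated objective: simpler
-- what changed: Replaces the flag-toggling character loop and final reversals with direct extended slicing: even-indexed chars palabra[::2] and odd-indexed palabra[1::2], each reversed and concatenated.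
import Mathlib
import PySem

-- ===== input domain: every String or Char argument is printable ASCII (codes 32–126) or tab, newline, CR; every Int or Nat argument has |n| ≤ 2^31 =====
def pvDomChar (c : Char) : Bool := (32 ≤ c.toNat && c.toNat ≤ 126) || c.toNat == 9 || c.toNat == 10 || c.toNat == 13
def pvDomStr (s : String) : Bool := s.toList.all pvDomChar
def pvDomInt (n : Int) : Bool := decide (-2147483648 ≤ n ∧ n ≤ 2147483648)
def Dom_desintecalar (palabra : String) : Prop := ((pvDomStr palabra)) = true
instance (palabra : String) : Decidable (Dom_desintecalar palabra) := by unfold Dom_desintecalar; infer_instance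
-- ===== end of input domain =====

-- B replaces A's flag-toggling loop with extended slicing (stride 2, then reverse); objective: simpler.

-- ===== PORT A =====
-- loop body: flag=1 appends to first_string and clears flag, flag=0 appends to second_string and sets it
def pvStep (st : List Char × List Char × Int) (letra : Char) : List Char × List Char × Int :=
  if st.2.2 = 1 then (st.1 ++ [letra], st.2.1, (0 : Int))
  else (st.1, st.2.1 ++ [letra], (1 : Int))

-- the flag loop over the characters, then first_string[::-1] + second_string[::-1] via PySem slice?
def desintecalar (palabra : String) : String :=
  let st := palabra.toList.foldl pvStep (([] : List Char), ([] : List Char), (1 : Int))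
  String.ofList ((PySem.List.slice? st.1 none none (-1)).getD []
    ++ (PySem.List.slice? st.2.1 none none (-1)).getD [])

-- ===== PORT B =====
-- palabra[::2][::-1] + palabra[1::2][::-1]; the .getD [] only totalizes slice? (step ≠ 0 always returns some)
def desintecalar_alt (palabra : String) : String :=
  let pares := (PySem.List.slice? palabra.toList none none 2).getD []
  let impares := (PySem.List.slice? palabra.toList (some 1) none 2).getD []
  String.ofList ((PySem.List.slice? pares none none (-1)).getD []
    ++ (PySem.List.slice? impares none none (-1)).getD [])

-- ===== PRECONDITION & SPEC =====
def Spec_desintecalar (palabra : String) (out : String) : Prop := out = desintecalar_alt palabra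
instance (palabra : String) (out : String) : Decidable (Spec_desintecalar palabra out) := by unfold Spec_desintecalar; infer_instance

-- ===== CLAIM =====
def Claim_equal_desintecalar : Prop := ∀ (palabra : String), Dom_desintecalar palabra → Spec_desintecalar palabra (desintecalar palabra)

-- ===== LEMMAS AND PROOFS =====

-- the even-indexed characters of a list
def pvEvens : List Char → List Char
  | [] => []
  | [c] => [c]
  | c :: _ :: r => c :: pvEvens r

-- the odd-indexed characters
def pvOdds (l : List Char) : List Char := pvEvens l.tail

theorem pvEvens_cons (d : Char) (r : List Char) : pvEvens (d :: r) = d :: pvOdds r := by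
  cases r with
  | nil => simp [pvEvens, pvOdds]
  | cons x r' => simp [pvEvens, pvOdds]

theorem pvFoldA (l : List Char) (f s : List Char) :
    l.foldl pvStep (f, s, (1 : Int))
    = (f ++ pvEvens l, s ++ pvOdds l, if l.length % 2 = 0 then (1 : Int) else 0) := by
  match l with
  | [] => simp [pvEvens, pvOdds]
  | [c] => simp [pvEvens, pvOdds, pvStep, List.foldl]
  | c :: d :: r =>
      have h1 : pvStep (f, s, (1 : Int)) c = (f ++ [c], s, 0) := by simp [pvStep]
      have h2 : pvStep (f ++ [c], s, (0 : Int)) d = (f ++ [c], s ++ [d], 1) := by simp [pvStep]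
      rw [List.foldl_cons, h1, List.foldl_cons, h2, pvFoldA r (f ++ [c]) (s ++ [d])]
      have hm : (r.length + 1 + 1) % 2 = r.length % 2 := by omega
      simp [pvEvens, pvOdds, pvEvens_cons, List.append_assoc, hm]

theorem pvFmEven (xs : List Char) :
    List.filterMap (fun k => xs[2 * k]?) (List.range ((xs.length + 1) / 2)) = pvEvens xs := by
  match xs with
  | [] => simp [pvEvens]
  | [c] => simp [pvEvens, List.range_succ]
  | c :: d :: r =>
      have ih := pvFmEven r
      have hdiv : ((c :: d :: r).length + 1) / 2 = (r.length + 1) / 2 + 1 := by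
        simp [List.length_cons]; omega
      rw [hdiv, List.range_succ_eq_map]
      simp only [List.filterMap_cons, List.filterMap_map]
      have hcomp : ((fun k => (c :: d :: r)[2 * k]?) ∘ Nat.succ) = fun k => r[2 * k]? := by
        funext k
        have : 2 * Nat.succ k = (2 * k) + 1 + 1 := by omega
        simp [Function.comp, this]
      rw [hcomp, ih]
      simp [pvEvens]

theorem pvFmOdd (xs : List Char) :
    List.filterMap (fun k => xs[2 * k + 1]?) (List.range (xs.length / 2)) = pvOdds xs := by
  match xs with
  | [] => simp [pvOdds, pvEvens]
  | [c] => simp [pvOdds, pvEvens]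
  | c :: d :: r =>
      have ih := pvFmOdd r
      have hdiv : (c :: d :: r).length / 2 = r.length / 2 + 1 := by
        simp [List.length_cons]; omega
      rw [hdiv, List.range_succ_eq_map]
      simp only [List.filterMap_cons, List.filterMap_map]
      have hcomp : ((fun k => (c :: d :: r)[2 * k + 1]?) ∘ Nat.succ) = fun k => r[2 * k + 1]? := by
        funext k
        have : 2 * Nat.succ k + 1 = (2 * k + 1) + 1 + 1 := by omega
        simp [Function.comp, this]
      rw [hcomp, ih]
      simp [pvOdds, pvEvens_cons]

theorem pvEvensSlice (xs : List Char) :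
    PySem.List.slice? xs none none 2 = some (pvEvens xs) := by
  rw [PySem.List.slice?]
  simp only [PySem.List.sliceIndices]
  norm_num
  have hc : (if 0 < xs.length then (((xs.length : Int) + 2 - 1) / 2).toNat else 0)
      = (xs.length + 1) / 2 := by
    split_ifs with h <;> omega
  have hidx : (fun k : Nat => xs[(2 * (k : Int)).toNat]?) = fun k : Nat => xs[2 * k]? := by
    funext k
    have h2 : (2 * (k : Int)).toNat = 2 * k := by omega
    rw [h2]
  rw [hc, hidx, pvFmEven]

theorem pvOddsSlice (xs : List Char) :
    PySem.List.slice? xs (some 1) none 2 = some (pvOdds xs) := by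
  rw [PySem.List.slice?]
  simp only [PySem.List.sliceIndices]
  norm_num
  rcases xs with _ | ⟨a, t⟩
  · simp [pvOdds, pvEvens]
  · have hmin : min (1 : Int) (((a :: t).length : Int)) = 1 := by
      simp [List.length_cons]
    rw [hmin]
    have hc : (if 1 < (a :: t).length then ((((a :: t).length : Int) - 1 + 2 - 1) / 2).toNat else 0)
        = (a :: t).length / 2 := by
      split_ifs with h <;> (simp only [List.length_cons] at h ⊢; omega)
    have hidx : (fun k : Nat => (a :: t)[(1 + 2 * (k : Int)).toNat]?)
        = fun k : Nat => (a :: t)[2 * k + 1]? := by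
      funext k
      have h2 : (1 + 2 * (k : Int)).toNat = 2 * k + 1 := by omega
      rw [h2]
    rw [hc, hidx, pvFmOdd]

-- ===== VERDICT =====
theorem desintecalar_spec : Claim_equal_desintecalar := by
  intro palabra _
  unfold Spec_desintecalar desintecalar desintecalar_alt
  rw [pvFoldA, pvEvensSlice, pvOddsSlice]
  simp [PySem.List.slice?_none_none_neg_one]
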